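-- pv_equiv track=rewrite | github.com/k-harada/AtCoder | ADT/20231019/C.py | solve
-- ===== SOURCE A (Python) =====
-- def solve(s):
--     flag_1 = 0
--     flag_2 = 0
--     for c in s:
--         if c.isupper():
--             flag_1 += 1
--         else:
--             flag_2 += 1
--     if flag_1 * flag_2 == 0:
--         return "No"
--     if len(set(list(s))) < len(s):
--         return "No"
--     return "Yes"
-- ===== SOURCE B (Python) =====
-- def solve(s):
--     if not any(c.isupper() for c in s):
--         return "No"
--     if all(c.isupper() for c in s):
--         return "No"
--     t = sorted(s)
--     if any(a == b for a, b in zip(t, t[1:])):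
--         return "No"
--     return "Yes"
-- ===== Notes on version B (the rewrite author's own statement) =====
-- stated objective: alternative
-- what changed: Replaces the counting loop plus set-based duplicate check with short-circuit existence tests (any/all of isupper) and sort-then-adjacent-scan duplicate detection.
import Mathlib
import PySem

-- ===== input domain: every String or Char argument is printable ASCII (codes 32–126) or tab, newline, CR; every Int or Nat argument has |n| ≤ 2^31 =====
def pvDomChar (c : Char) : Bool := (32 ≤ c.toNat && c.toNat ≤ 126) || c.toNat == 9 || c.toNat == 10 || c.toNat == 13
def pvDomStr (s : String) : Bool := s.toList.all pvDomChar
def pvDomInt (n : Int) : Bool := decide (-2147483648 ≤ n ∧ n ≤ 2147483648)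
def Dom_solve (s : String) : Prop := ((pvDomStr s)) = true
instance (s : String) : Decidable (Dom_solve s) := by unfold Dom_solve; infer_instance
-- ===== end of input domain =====

-- B replaces the counting loop + set-based duplicate check with any/all existence
-- tests and sort-then-adjacent-scan duplicate detection (alternative algorithm).

-- ===== PORT A =====
def solve (s : String) : String :=
  let p := s.toList.foldl
    (fun (fl : Int × Int) c =>
      if PySem.Chars.isupper c then (fl.1 + 1, fl.2) else (fl.1, fl.2 + 1))
    (0, 0)
  if p.1 * p.2 == 0 then "No"
  else if (PySem.Set.ofList s.toList).length < s.toList.length then "No"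
  else "Yes"

-- ===== PORT B =====
def solve_alt (s : String) : String :=
  if !(s.toList.any (fun c => PySem.Chars.isupper c)) then "No"
  else if s.toList.all (fun c => PySem.Chars.isupper c) then "No"
  else
    let t := PySem.List.sorted s.toList (fun x => x) false
    if (t.zip (PySem.List.slice t (some 1) none)).any (fun p => p.1 == p.2) then "No"
    else "Yes"

-- ===== PRECONDITION & SPEC =====
def Spec_solve (s : String) (out : String) : Prop := out = solve_alt s
instance (s : String) (out : String) : Decidable (Spec_solve s out) := by unfold Spec_solve; infer_instance

-- ===== CLAIM (what is proved, stated in full; the proofs are below) =====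
def Claim_equal_solve : Prop := ∀ (s : String), Dom_solve s → Spec_solve s (solve s)

-- ===== LEMMAS AND PROOFS =====

-- A's counting loop computes the two countP's.
theorem solve_fold_count (l : List Char) (a b : Int) :
    l.foldl
      (fun (fl : Int × Int) c =>
        if PySem.Chars.isupper c then (fl.1 + 1, fl.2) else (fl.1, fl.2 + 1))
      (a, b)
    = (a + l.countP (fun c => PySem.Chars.isupper c),
       b + l.countP (fun c => !PySem.Chars.isupper c)) := by
  induction l generalizing a b with
  | nil => simp
  | cons c t ih =>
    by_cases h : PySem.Chars.isupper c = true <;>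
      simp [List.countP_cons, h, ih, add_assoc, add_comm] <;> ring

-- the adjacent-equality scan on a ≤-sorted list detects exactly non-Nodup
theorem adj_scan_nodup (t : List Char) (hp : t.Pairwise (· ≤ ·)) :
    ((t.zip t.tail).any (fun p => p.1 == p.2)) = false ↔ t.Nodup := by
  induction t with
  | nil => simp
  | cons a rest ih =>
    cases rest with
    | nil => simp
    | cons b r =>
      have hp' : (b :: r).Pairwise (· ≤ ·) := hp.of_cons
      have har : ∀ x ∈ b :: r, a ≤ x := fun x hx => List.rel_of_pairwise_cons hp hx
      have hbr : ∀ x ∈ r, b ≤ x := fun x hx => List.rel_of_pairwise_cons hp' hx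
      have hab : a ≤ b := har b List.mem_cons_self
      have key : (((a :: b :: r).zip (a :: b :: r).tail).any (fun p => p.1 == p.2) = false)
          ↔ (a ≠ b ∧ (((b :: r).zip (b :: r).tail).any (fun p => p.1 == p.2) = false)) := by
        simp
      rw [key, ih hp', List.nodup_cons (a := a)]
      constructor
      · rintro ⟨hne, hnd⟩
        refine ⟨fun hmem => ?_, hnd⟩
        rcases List.mem_cons.mp hmem with rfl | hmem
        · exact hne rfl
        · exact hne (le_antisymm hab (hbr a hmem))
      · rintro ⟨hnotmem, hnd⟩
        exact ⟨fun h => hnotmem (h ▸ List.mem_cons_self), hnd⟩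

-- A's set-size test detects exactly non-Nodup
theorem set_len_lt (l : List Char) :
    ((PySem.Set.ofList l).length < l.length) ↔ ¬ l.Nodup := by
  have hset : (PySem.Set.ofList l).toFinset = l.toFinset := by
    ext x; simp [List.mem_toFinset, PySem.Set.mem_ofList]
  have hnd : (PySem.Set.ofList l).Nodup := PySem.Set.nodup_ofList l
  have hlen : (PySem.Set.ofList l).length = l.toFinset.card := by
    rw [← hset, List.toFinset_card_of_nodup hnd]
  constructor
  · intro hlt hnodup
    rw [hlen, List.toFinset_card_of_nodup hnodup] at hlt
    omega
  · intro hnodup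
    rw [hlen]
    exact lt_of_le_of_ne (List.toFinset_card_le _)
      (fun h => hnodup ((Multiset.toFinset_card_eq_card_iff_nodup (m := (l : Multiset Char))).mp h))

theorem solve_eq_alt (s : String) : solve s = solve_alt s := by
  unfold solve solve_alt
  simp only [PySem.List.slice_from_one]
  set l := s.toList with hl
  rw [solve_fold_count]
  have hany : (l.countP (fun c => PySem.Chars.isupper c) = 0) ↔
      (l.any (fun c => PySem.Chars.isupper c)) = false := by
    simp [List.countP_eq_zero, List.any_eq_false]
  have hall : (l.countP (fun c => !PySem.Chars.isupper c) = 0) ↔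
      (l.all (fun c => PySem.Chars.isupper c)) = true := by
    simp [List.countP_eq_zero, List.all_eq_true]
  by_cases h1 : (l.any (fun c => PySem.Chars.isupper c)) = false
  · have : ((0 : Int) + l.countP (fun c => PySem.Chars.isupper c)) = 0 := by
      rw [hany.mpr h1]; rfl
    simp [this, h1]
  · by_cases h2 : (l.all (fun c => PySem.Chars.isupper c)) = true
    · have : ((0 : Int) + l.countP (fun c => !PySem.Chars.isupper c)) = 0 := by
        rw [hall.mpr h2]; rfl
      simp [this, h2, h1]
    · have hc1 : (l.countP (fun c => PySem.Chars.isupper c) : Int) ≠ 0 := by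
        intro h; exact h1 (hany.mp (by exact_mod_cast h))
      have hc2 : (l.countP (fun c => !PySem.Chars.isupper c) : Int) ≠ 0 := by
        intro h; exact h2 (hall.mp (by exact_mod_cast h))
      have hprod : ((0 : Int) + l.countP (fun c => PySem.Chars.isupper c)) *
          ((0 : Int) + l.countP (fun c => !PySem.Chars.isupper c)) ≠ 0 := by
        simp only [zero_add]; exact mul_ne_zero hc1 hc2
      simp only [beq_iff_eq, hprod, if_false, h1, Bool.not_false, if_true, h2, Bool.false_eq_true,
        if_false]
      have hperm := PySem.List.sorted_perm l (fun x => x) false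
      have hpair : (PySem.List.sorted l (fun x => x) false).Pairwise (· ≤ ·) :=
        PySem.List.sorted_pairwise l (fun x => x)
      have hadj := adj_scan_nodup (PySem.List.sorted l (fun x => x) false) hpair
      have hnodup_iff : (PySem.List.sorted l (fun x => x) false).Nodup ↔ l.Nodup :=
        hperm.nodup_iff
      by_cases hset : (PySem.Set.ofList l).length < l.length
      · have hnd : ¬ l.Nodup := (set_len_lt l).mp hset
        have : ((PySem.List.sorted l (fun x => x) false).zip
            (PySem.List.sorted l (fun x => x) false).tail).any (fun p => p.1 == p.2) = true := by
          rcases Bool.eq_false_or_eq_true (((PySem.List.sorted l (fun x => x) false).zip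
            (PySem.List.sorted l (fun x => x) false).tail).any (fun p => p.1 == p.2)) with h | h
          · exact h
          · exact absurd (hnodup_iff.mp (hadj.mp h)) hnd
        simp [hset, this]
      · have hnd : l.Nodup := by
          by_contra hc
          exact hset ((set_len_lt l).mpr hc)
        have : ((PySem.List.sorted l (fun x => x) false).zip
            (PySem.List.sorted l (fun x => x) false).tail).any (fun p => p.1 == p.2) = false :=
          hadj.mpr (hnodup_iff.mpr hnd)
        simp [hset, this]

-- ===== VERDICT (by name: the statement is the Claim_ definition above) =====
theorem solve_spec : Claim_equal_solve := by
  intro s _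
  unfold Spec_solve
  exact solve_eq_alt s
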